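-- pv_equiv track=rewrite | github.com/ronikobrosly/automated-job-search | src/scrapers/sites/hirebase_scraper.py | _looks_like_job_title
-- ===== SOURCE A (Python) =====
-- def _looks_like_job_title(text: str) -> bool:
--     """Check if text looks like a job title"""
--     if not text or len(text) < 5 or len(text) > 100:
--         return False
--
--     # Common job title keywords
--     job_keywords = [
--         'engineer', 'scientist', 'developer', 'analyst', 'manager', 'director',
--         'specialist', 'consultant', 'architect', 'lead', 'senior', 'junior',
--         'data', 'machine learning', 'ai', 'artificial intelligence', 'ml',
--         'software', 'backend', 'frontend', 'fullstack', 'devops', 'cloud'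
--     ]
--
--     text_lower = text.lower()
--     return any(keyword in text_lower for keyword in job_keywords)
-- ===== SOURCE B (Python) =====
-- _KEYWORDS = (
--     'engineer|scientist|developer|analyst|manager|director|'
--     'specialist|consultant|architect|lead|senior|junior|'
--     'data|machine learning|ai|artificial intelligence|ml|'
--     'software|backend|frontend|fullstack|devops|cloud'
-- ).split('|')
--
-- # index the keywords once by their first character
-- _BY_FIRST = {}
-- for _kw in _KEYWORDS:
--     _BY_FIRST.setdefault(_kw[0], []).append(_kw)
--
--
-- def _looks_like_job_title(text: str) -> bool:
--     """Check if text looks like a job title (suffix scan with first-char dispatch)."""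
--     if not (5 <= len(text) <= 100):
--         return False
--
--     s = text.lower()
--     while s:
--         for kw in _BY_FIRST.get(s[0], ()):
--             if s.startswith(kw):
--                 return True
--         s = s[1:]
--     return False
-- ===== Notes on version B (the rewrite author's own statement) =====
-- stated objective: alternative
-- what changed: B stores the keywords in a dict indexed by their first character (built once) and makes a single suffix-by-suffix scan of the lowered text, at each position testing only the keywords whose first character matches, instead of A's loop over all 23 keywords each running its own substring scan.
import Mathlib
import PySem

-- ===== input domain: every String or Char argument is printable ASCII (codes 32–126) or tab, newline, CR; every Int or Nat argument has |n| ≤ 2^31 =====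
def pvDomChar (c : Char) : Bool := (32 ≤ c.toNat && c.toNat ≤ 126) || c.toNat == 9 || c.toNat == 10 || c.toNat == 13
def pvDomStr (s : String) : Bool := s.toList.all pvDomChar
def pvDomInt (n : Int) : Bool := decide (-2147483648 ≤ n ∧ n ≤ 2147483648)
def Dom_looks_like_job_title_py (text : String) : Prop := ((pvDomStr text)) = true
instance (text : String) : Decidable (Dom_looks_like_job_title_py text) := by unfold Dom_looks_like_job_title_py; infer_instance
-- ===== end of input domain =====

-- B indexes the keywords by their first character (a dict built once) and scans the
-- lowered text suffix by suffix, testing only the matching-first-char bucket at each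
-- position, instead of A's per-keyword substring scans (alternative).

-- ===== PORT A =====
-- A's keyword list literal
def pvJobKeywords : List String :=
  ["engineer", "scientist", "developer", "analyst", "manager", "director",
   "specialist", "consultant", "architect", "lead", "senior", "junior",
   "data", "machine learning", "ai", "artificial intelligence", "ml",
   "software", "backend", "frontend", "fullstack", "devops", "cloud"]

def looks_like_job_title_py (text : String) : Bool :=
  if PySem.Str.len text = 0 ∨ PySem.Str.len text < 5 ∨ PySem.Str.len text > 100 then false
  else
    let text_lower := PySem.Str.lower text
    pvJobKeywords.any (fun keyword => PySem.Str.isIn keyword text_lower)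

-- ===== PORT B =====
-- B's module-level data: one '|'-joined literal, split once
def pvKwSplit : List (List Char) :=
  PySem.Chars.splitOn ("engineer|scientist|developer|analyst|manager|director|specialist|consultant|architect|lead|senior|junior|data|machine learning|ai|artificial intelligence|ml|software|backend|frontend|fullstack|devops|cloud").toList ['|']

-- _BY_FIRST: setdefault(kw[0], []).append(kw) loop (kw[0] ported as headD — every keyword is nonempty)
def pvByFirst : PySem.Dict Char (List (List Char)) :=
  (pvKwSplit.map (fun kw => (kw.headD ' ', kw))).foldl
    (fun d p => d.modify p.1 [] (· ++ [p.2])) PySem.Dict.empty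

-- the 'while s: … s = s[1:]' loop
def pvScanSuffixes : List Char → Bool
  | [] => false
  | c :: rest =>
      ((pvByFirst.getD c []).any (fun kw => PySem.Chars.startswith (c :: rest) kw))
      || pvScanSuffixes rest

def looks_like_job_title_py_alt (text : String) : Bool :=
  if 5 ≤ PySem.Str.len text ∧ PySem.Str.len text ≤ 100 then
    pvScanSuffixes (PySem.Chars.lower text.toList)
  else false

-- ===== PRECONDITION & SPEC =====
def Spec_looks_like_job_title_py (text : String) (out : Bool) : Prop := out = looks_like_job_title_py_alt text
instance (text : String) (out : Bool) : Decidable (Spec_looks_like_job_title_py text out) := by unfold Spec_looks_like_job_title_py; infer_instance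

-- ===== CLAIM (what is proved, stated in full; the proofs are below) =====
def Claim_equal_looks_like_job_title_py : Prop := ∀ (text : String), Dom_looks_like_job_title_py text → Spec_looks_like_job_title_py text (looks_like_job_title_py text)

-- ===== LEMMAS AND PROOFS =====

-- the split literal is exactly A's keyword list
set_option maxRecDepth 4096 in
theorem pv_split_eq : pvKwSplit = pvJobKeywords.map String.toList := by decide

-- every keyword is nonempty
set_option maxRecDepth 4096 in
theorem pv_kw_ne_nil : ∀ kw ∈ pvKwSplit, kw ≠ [] := by decide

-- grouping pairs (g kw, kw) and reading back bucket c = filtering on g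
theorem pv_filter_map_pairs {α κ : Type} [BEq κ] (g : α → κ) (c : κ) (l : List α) :
    ((l.map (fun kw => (g kw, kw))).filter (fun p => p.1 == c)).map (·.2)
      = l.filter (fun kw => g kw == c) := by
  induction l with
  | nil => rfl
  | cons x xs ih => simp only [List.map_cons, List.filter_cons]; split_ifs <;> simp [ih]

-- the first-char bucket of c holds exactly the keywords starting with c
theorem pv_bucket (c : Char) :
    pvByFirst.getD c [] = pvKwSplit.filter (fun kw => kw.headD ' ' == c) := by
  unfold pvByFirst
  rw [PySem.Dict.getD_foldl_modify_append, PySem.Dict.getD_empty]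
  simpa using pv_filter_map_pairs (fun kw => kw.headD ' ') c pvKwSplit

-- at each position, testing the bucket = testing all keywords
theorem pv_dispatch (c : Char) (rest : List Char) :
    (pvByFirst.getD c []).any (fun kw => PySem.Chars.startswith (c :: rest) kw)
      = pvKwSplit.any (fun kw => PySem.Chars.startswith (c :: rest) kw) := by
  rw [pv_bucket, Bool.eq_iff_iff]
  simp only [List.any_eq_true, List.mem_filter, PySem.Chars.startswith_iff]
  constructor
  · rintro ⟨kw, ⟨hmem, _⟩, hpre⟩; exact ⟨kw, hmem, hpre⟩
  · rintro ⟨kw, hmem, hpre⟩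
    refine ⟨kw, ⟨hmem, ?_⟩, hpre⟩
    cases kw with
    | nil => exact absurd rfl (pv_kw_ne_nil [] hmem)
    | cons k0 ktl =>
        obtain ⟨t, ht⟩ := hpre
        injection ht with h1 _
        simp [h1]

-- the suffix scan decides substring containment of any keyword
set_option maxRecDepth 4096 in
theorem pv_scan_eq (l : List Char) :
    pvScanSuffixes l = pvKwSplit.any (fun kw => PySem.Chars.isIn kw l) := by
  induction l with
  | nil => rfl
  | cons c rest ih =>
      unfold pvScanSuffixes
      rw [pv_dispatch, ih, Bool.eq_iff_iff]
      simp only [Bool.or_eq_true, List.any_eq_true, PySem.Chars.startswith_iff]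
      constructor
      · rintro (⟨kw, hmem, hpre⟩ | ⟨kw, hmem, hin⟩)
        · exact ⟨kw, hmem, (PySem.Chars.exists_prefix_drop_iff_isIn kw (c :: rest)).mp ⟨0, hpre⟩⟩
        · obtain ⟨j, hj⟩ := (PySem.Chars.exists_prefix_drop_iff_isIn kw rest).mpr hin
          exact ⟨kw, hmem, (PySem.Chars.exists_prefix_drop_iff_isIn kw (c :: rest)).mp ⟨j + 1, hj⟩⟩
      · rintro ⟨kw, hmem, hin⟩
        obtain ⟨j, hj⟩ := (PySem.Chars.exists_prefix_drop_iff_isIn kw (c :: rest)).mpr hin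
        cases j with
        | zero => exact Or.inl ⟨kw, hmem, hj⟩
        | succ j' =>
            exact Or.inr ⟨kw, hmem, (PySem.Chars.exists_prefix_drop_iff_isIn kw rest).mp ⟨j', hj⟩⟩

-- ===== VERDICT (by name: the statement is the Claim_ definition above) =====
theorem looks_like_job_title_py_spec : Claim_equal_looks_like_job_title_py := by
  intro text _
  unfold Spec_looks_like_job_title_py looks_like_job_title_py looks_like_job_title_py_alt
  by_cases hg : 5 ≤ PySem.Str.len text ∧ PySem.Str.len text ≤ 100
  · rw [if_neg (by omega), if_pos hg]
    rw [pv_scan_eq, pv_split_eq, List.any_map]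
    simp [Function.comp_def, PySem.Str.isIn_eq, PySem.Str.toList_lower]
  · rw [if_pos (by omega), if_neg hg]
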